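-- pv_equiv track=rewrite | github.com/Andrei8cristea/Y2S2AI | problema3/main.py | crossover_quadrants
-- ===== SOURCE A (Python) =====
-- WALL = 0
--
-- START = 2
--
-- EXIT = 3
--
-- def crossover_quadrants(m1, m2):
--     n, m = len(m1), len(m1[0])
--     mid_i = n // 2
--     mid_j = m // 2
--     child = [[WALL for _ in range(m)] for _ in range(n)]
--
--     for i in range(n):
--         for j in range(m):
--             if i < mid_i and j < mid_j:
--                 child[i][j] = m1[i][j]
--             elif i < mid_i and j >= mid_j:
--                 child[i][j] = m2[i][j]
--             elif i >= mid_i and j < mid_j: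
--                 child[i][j] = m2[i][j]
--             else:
--                 child[i][j] = m1[i][j]
--
--     child[1][1] = START
--     child[n - 2][m - 2] = EXIT
--     return child
-- ===== SOURCE B (Python) =====
-- WALL = 0
--
-- START = 2
--
-- EXIT = 3
--
-- def crossover_quadrants(m1, m2):
--     n, m = len(m1), len(m1[0])
--     half = m // 2
--     k = n // 2
--     top = [a[:half] + b[half:] for a, b in zip(m1[:k], m2[:k])]
--     bot = [b[:half] + a[half:] for b, a in zip(m2[k:], m1[k:])]
--     child = top + bot
--     child[1][1] = START
--     child[n - 2][m - 2] = EXIT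
--     return child
-- ===== Notes on version B (the rewrite author's own statement) =====
-- stated objective: simpler
-- what changed: Replaces the per-cell nested loop with its 4-way quadrant conditional over a pre-built WALL grid by a whole-grid construction: the child is the concatenation of two zips of the parents' row halves, each child row built at C speed as a slice concatenation.
import Mathlib
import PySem

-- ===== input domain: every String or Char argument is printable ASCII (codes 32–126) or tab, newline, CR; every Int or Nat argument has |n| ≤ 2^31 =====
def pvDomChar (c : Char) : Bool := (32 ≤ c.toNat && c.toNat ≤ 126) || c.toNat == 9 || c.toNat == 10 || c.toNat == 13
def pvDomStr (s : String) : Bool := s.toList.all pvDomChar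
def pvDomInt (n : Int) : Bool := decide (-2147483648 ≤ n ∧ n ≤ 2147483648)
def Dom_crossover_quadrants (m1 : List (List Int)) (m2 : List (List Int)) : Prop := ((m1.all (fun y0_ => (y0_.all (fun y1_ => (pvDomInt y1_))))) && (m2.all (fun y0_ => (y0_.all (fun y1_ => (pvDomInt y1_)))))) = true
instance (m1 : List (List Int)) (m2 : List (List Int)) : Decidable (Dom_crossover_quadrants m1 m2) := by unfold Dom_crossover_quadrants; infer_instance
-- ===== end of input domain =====

-- B builds the child in one shot as two zipped halves of the parents (row slices glued by
-- zip), instead of A's per-cell nested loop with a 4-way quadrant conditional over a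
-- pre-built WALL grid.  Equivalence is about the return value; A and B both mutate only
-- the freshly built child, never their arguments.

-- grid[i][j] = v  (indices are in range on every admitted input; Python raises outside Pre_)
def setCell (g : List (List Int)) (i j : Nat) (v : Int) : List (List Int) :=
  g.set i ((g.getD i []).set j v)

-- ===== PORT A =====
-- literal transliteration; m1[i][j] / m2[i][j] are read with getD, exact since under
-- Pre_ every such index is in range (Python raises IndexError outside Pre_).
def crossover_quadrants (m1 : List (List Int)) (m2 : List (List Int)) : List (List Int) :=
  let n := m1.length
  let m := (m1.getD 0 []).length
  let midI := n / 2
  let midJ := m / 2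
  let child0 := List.replicate n (List.replicate m (0 : Int))   -- WALL = 0
  let child := (List.range n).foldl (fun ch i =>
    (List.range m).foldl (fun ch j =>
      let v :=
        if i < midI ∧ j < midJ then (m1.getD i []).getD j 0
        else if i < midI ∧ midJ ≤ j then (m2.getD i []).getD j 0
        else if midI ≤ i ∧ j < midJ then (m2.getD i []).getD j 0
        else (m1.getD i []).getD j 0
      setCell ch i j v) ch) child0
  let child := setCell child 1 1 2                              -- START = 2
  setCell child (n - 2) (m - 2) 3                               -- EXIT = 3

-- ===== PORT B =====
-- zip of the parents' halves; a[:half] = take half, a[half:] = drop half (exact Python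
-- slice semantics for these non-negative bounds); child[i][j] = v becomes List.modify.
def crossover_quadrants_alt (m1 : List (List Int)) (m2 : List (List Int)) : List (List Int) :=
  let n := m1.length
  let m := (m1.getD 0 []).length
  let half := m / 2
  let k := n / 2
  let top := List.zipWith (fun a b => a.take half ++ b.drop half) (m1.take k) (m2.take k)
  let bot := List.zipWith (fun b a => b.take half ++ a.drop half) (m2.drop k) (m1.drop k)
  let child := top ++ bot
  let child := child.modify 1 (fun r => r.set 1 2)              -- START = 2
  child.modify (n - 2) (fun r => r.set (m - 2) 3)               -- EXIT = 3

-- ===== PRECONDITION & SPEC =====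
-- Pre_ = both parents are rectangular n×m grids of the SAME shape, n,m ≥ 2 (two mazes of
-- one population).  It excludes (a) shape mismatches on which A raises IndexError, and
-- (b) ragged/oversized inputs (extra cells in a row, extra columns of m2) whose surplus
-- cells A silently ignores while B's row slices keep them — outside the function's
-- equal-shape maze-grid purpose, neither value is specified.
def Pre_crossover_quadrants (m1 : List (List Int)) (m2 : List (List Int)) : Prop :=
  2 ≤ m1.length ∧ m2.length = m1.length ∧ 2 ≤ (m1.getD 0 []).length ∧
  (∀ r ∈ m1, r.length = (m1.getD 0 []).length) ∧
  (∀ r ∈ m2, r.length = (m1.getD 0 []).length)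
instance (m1 : List (List Int)) (m2 : List (List Int)) : Decidable (Pre_crossover_quadrants m1 m2) := by
  unfold Pre_crossover_quadrants; infer_instance

def pvWitness_crossover_quadrants : List (List Int) × List (List Int) :=
  ([[1, 1], [1, 1]], [[5, 5], [5, 5]])

def Spec_crossover_quadrants (m1 : List (List Int)) (m2 : List (List Int)) (out : List (List Int)) : Prop := out = crossover_quadrants_alt m1 m2
instance (m1 : List (List Int)) (m2 : List (List Int)) (out : List (List Int)) : Decidable (Spec_crossover_quadrants m1 m2 out) := by unfold Spec_crossover_quadrants; infer_instance

-- ===== CLAIM (what is proved, stated in full; the proofs are below) =====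
def Claim_equal_crossover_quadrants : Prop := ∀ (m1 : List (List Int)) (m2 : List (List Int)), Dom_crossover_quadrants m1 m2 → Pre_crossover_quadrants m1 m2 → Spec_crossover_quadrants m1 m2 (crossover_quadrants m1 m2)

-- ===== LEMMAS AND PROOFS =====

-- A's in-place cell write and B's List.modify row edit are the same grid operation
theorem setCell_eq_modify (g : List (List Int)) (i j : Nat) (v : Int) :
    setCell g i j v = g.modify i (fun r => r.set j v) := by
  by_cases h : i < g.length
  · rw [List.modify_eq_set_getElem?, List.getElem?_eq_getElem h]
    simp [setCell, List.getD, List.getElem?_eq_getElem h]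
  · have hle : g.length ≤ i := by omega
    have h1 : g[i]? = none := List.getElem?_eq_none hle
    rw [List.modify_eq_set_getElem?, h1]
    simp [setCell, List.getD, h1, List.set_eq_of_length_le hle]

-- folding `set` over range k writes the first k cells and leaves the rest
theorem foldl_set_range {α : Type} (f : Nat → α) :
    ∀ (k : Nat) (row : List α), k ≤ row.length →
      (List.range k).foldl (fun r j => r.set j (f j)) row
        = (List.range k).map f ++ row.drop k := by
  intro k
  induction k with
  | zero => intro row _; simp
  | succ k ih =>
    intro row hk
    have hk' : k ≤ row.length := by omega
    have hlt : k < row.length := by omega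
    rw [List.range_succ, List.foldl_append, ih row hk', List.map_append]
    have hdrop : row.drop k = row[k] :: row.drop (k + 1) :=
      (List.drop_eq_getElem_cons hlt)
    simp only [List.foldl_cons, List.foldl_nil, List.set_append, List.length_map,
      List.length_range, lt_irrefl, if_false, Nat.sub_self, hdrop, List.set_cons_zero]
    simp

-- the inner per-row fold of setCell factors through one `set` of the grid
theorem foldl_setCell (i : Nat) (f : Nat → Int) :
    ∀ (js : List Nat) (ch : List (List Int)), i < ch.length →
      js.foldl (fun c j => setCell c i j (f j)) ch
        = ch.set i (js.foldl (fun r j => r.set j (f j)) (ch.getD i [])) := by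
  intro js
  induction js with
  | nil =>
    intro ch hch
    simp [List.getD, List.getElem?_eq_getElem hch, List.set_getElem_self]
  | cons j js ih =>
    intro ch hch
    have h1 : i < (setCell ch i j (f j)).length := by
      simpa [setCell] using hch
    rw [List.foldl_cons, ih _ h1]
    have hget : (setCell ch i j (f j)).getD i [] = (ch.getD i []).set j (f j) := by
      simp [setCell, List.getD, List.getElem?_set_self', List.getElem?_eq_getElem hch]
    rw [hget]
    simp [setCell, List.set_set]

-- a range-map split at mj equals take/drop concatenation
theorem map_range_split (m mj : Nat) (r1 r2 : List Int)
    (h1 : r1.length = m) (h2 : r2.length = m) (hmj : mj ≤ m) :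
    (List.range m).map (fun j => if j < mj then r1.getD j 0 else r2.getD j 0)
      = r1.take mj ++ r2.drop mj := by
  apply List.ext_getElem
  · simp [h1, h2]; omega
  · intro k hk hk'
    simp only [List.getElem_map, List.getElem_range]
    have hkm : k < m := by simpa using hk
    by_cases h : k < mj
    · rw [if_pos h, List.getElem_append_left (by simp [h1]; omega),
        List.getElem_take, List.getD_eq_getElem r1 0 (by omega)]
    · rw [if_neg h, List.getElem_append_right (by simp [h1]; omega)]
      rw [List.getElem_drop, List.getD_eq_getElem r2 0 (by omega)]
      congr 1
      simp [h1]; omega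

-- the whole double fold over a fresh WALL grid builds the grid of per-cell values
theorem foldl_grid (n m : Nat) (cellF : Nat → Nat → Int) :
    ∀ k, k ≤ n →
      (List.range k).foldl
        (fun ch i => (List.range m).foldl (fun ch j => setCell ch i j (cellF i j)) ch)
        (List.replicate n (List.replicate m (0:Int)))
      = (List.range k).map (fun i => (List.range m).map (cellF i))
        ++ (List.replicate n (List.replicate m (0:Int))).drop k := by
  intro k
  induction k with
  | zero => intro _; simp
  | succ k ih =>
    intro hk
    have hk' : k ≤ n := by omega
    rw [List.range_succ, List.foldl_append, ih hk', List.foldl_cons, List.foldl_nil]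
    set P := (List.range k).map (fun i => (List.range m).map (cellF i)) with hP
    have hplen : P.length = k := by simp [hP]
    have hdrop : (List.replicate n (List.replicate m (0:Int))).drop k
        = List.replicate m (0:Int) :: (List.replicate n (List.replicate m (0:Int))).drop (k+1) := by
      rw [List.drop_replicate, List.drop_replicate]
      have h : n - k = (n - (k+1)) + 1 := by omega
      rw [h, List.replicate_succ]
    set R := (List.replicate n (List.replicate m (0:Int))).drop (k+1) with hR
    rw [hdrop]
    have hlt : k < (P ++ List.replicate m (0:Int) :: R).length := by
      simp [hplen]
    rw [foldl_setCell k (cellF k) (List.range m) _ hlt]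
    have hget : (P ++ List.replicate m (0:Int) :: R).getD k []
        = List.replicate m (0:Int) := by
      simp [List.getD, hplen]
    rw [hget, foldl_set_range (cellF k) m (List.replicate m (0:Int)) (by simp)]
    simp only [List.drop_replicate, Nat.sub_self, List.replicate_zero, List.append_nil]
    rw [List.set_append]
    simp only [hplen, lt_irrefl, if_false, Nat.sub_self, List.set_cons_zero]
    simp [List.map_append]
    exact hP

-- a map over range n that switches at k equals the concatenation of two zipped halves
theorem map_range_eq_zip (m1 m2 : List (List Int)) (n : Nat)
    (h1 : m1.length = n) (h2 : m2.length = n) (k : Nat) (hk : k ≤ n)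
    (f g : List Int → List Int → List Int) :
    (List.range n).map (fun i =>
        if i < k then f (m1.getD i []) (m2.getD i [])
        else g (m2.getD i []) (m1.getD i []))
      = List.zipWith f (m1.take k) (m2.take k)
        ++ List.zipWith g (m2.drop k) (m1.drop k) := by
  apply List.ext_getElem
  · simp [h1, h2]; omega
  · intro i hi hi'
    have hin : i < n := by simpa using hi
    have hi1 : i < m1.length := by omega
    have hi2 : i < m2.length := by omega
    have hlenT : (List.zipWith f (m1.take k) (m2.take k)).length = k := by
      simp [h1, h2]; omega
    simp only [List.getElem_map, List.getElem_range]
    by_cases h : i < k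
    · rw [if_pos h, List.getElem_append_left (by omega)]
      rw [List.getElem_zipWith, List.getElem_take, List.getElem_take,
        List.getD_eq_getElem m1 [] hi1, List.getD_eq_getElem m2 [] hi2]
    · rw [if_neg h, List.getElem_append_right (by omega)]
      rw [List.getElem_zipWith, List.getElem_drop, List.getElem_drop]
      have hidx : k + (i - (List.zipWith f (List.take k m1) (List.take k m2)).length) = i := by
        rw [hlenT]; omega
      simp only [hidx]
      rw [List.getD_eq_getElem m1 [] hi1, List.getD_eq_getElem m2 [] hi2]

-- ===== VERDICT (by name: the statement is the Claim_ definition above) =====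
theorem crossover_quadrants_spec : Claim_equal_crossover_quadrants := by
  intro m1 m2 _ hpre
  obtain ⟨hn, hlen2, hm, hrow1, hrow2⟩ := hpre
  unfold Spec_crossover_quadrants crossover_quadrants crossover_quadrants_alt
  set n := m1.length with hn_def
  set m := (m1.getD 0 []).length with hm_def
  have hrl1 : ∀ i, i < n → (m1.getD i []).length = m := by
    intro i hi
    rw [List.getD_eq_getElem m1 [] hi]
    exact hrow1 _ (List.getElem_mem hi)
  have hrl2 : ∀ i, i < n → (m2.getD i []).length = m := by
    intro i hi
    have hi2 : i < m2.length := by omega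
    rw [List.getD_eq_getElem m2 [] hi2]
    exact hrow2 _ (List.getElem_mem hi2)
  have hgrid :
      (List.range n).foldl (fun ch i => (List.range m).foldl (fun ch j =>
          setCell ch i j
            (if i < n/2 ∧ j < m/2 then (m1.getD i []).getD j 0
             else if i < n/2 ∧ m/2 ≤ j then (m2.getD i []).getD j 0
             else if n/2 ≤ i ∧ j < m/2 then (m2.getD i []).getD j 0
             else (m1.getD i []).getD j 0)) ch)
        (List.replicate n (List.replicate m (0:Int)))
      = List.zipWith (fun a b => a.take (m/2) ++ b.drop (m/2)) (m1.take (n/2)) (m2.take (n/2))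
        ++ List.zipWith (fun b a => b.take (m/2) ++ a.drop (m/2)) (m2.drop (n/2)) (m1.drop (n/2)) := by
    rw [foldl_grid n m _ n le_rfl]
    simp only [List.drop_replicate, Nat.sub_self, List.replicate_zero, List.append_nil]
    rw [← map_range_eq_zip m1 m2 n rfl hlen2 (n/2) (Nat.div_le_self _ _)]
    apply List.map_congr_left
    intro i hi
    rw [List.mem_range] at hi
    by_cases hcase : i < n/2
    · rw [if_pos hcase]
      have hrw : (List.range m).map (fun j =>
            if i < n/2 ∧ j < m/2 then (m1.getD i []).getD j 0
            else if i < n/2 ∧ m/2 ≤ j then (m2.getD i []).getD j 0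
            else if n/2 ≤ i ∧ j < m/2 then (m2.getD i []).getD j 0
            else (m1.getD i []).getD j 0)
          = (List.range m).map (fun j =>
            if j < m/2 then (m1.getD i []).getD j 0 else (m2.getD i []).getD j 0) := by
        apply List.map_congr_left
        intro j _
        by_cases hj : j < m/2
        · rw [if_pos ⟨hcase, hj⟩, if_pos hj]
        · rw [if_neg (by tauto), if_pos ⟨hcase, Nat.le_of_not_lt hj⟩, if_neg hj]
      rw [hrw, map_range_split m (m/2) _ _ (hrl1 i hi) (hrl2 i hi) (Nat.div_le_self _ _)]
    · rw [if_neg hcase]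
      have hrw : (List.range m).map (fun j =>
            if i < n/2 ∧ j < m/2 then (m1.getD i []).getD j 0
            else if i < n/2 ∧ m/2 ≤ j then (m2.getD i []).getD j 0
            else if n/2 ≤ i ∧ j < m/2 then (m2.getD i []).getD j 0
            else (m1.getD i []).getD j 0)
          = (List.range m).map (fun j =>
            if j < m/2 then (m2.getD i []).getD j 0 else (m1.getD i []).getD j 0) := by
        apply List.map_congr_left
        intro j _
        by_cases hj : j < m/2
        · rw [if_neg (by tauto), if_neg (by tauto),
            if_pos ⟨Nat.le_of_not_lt hcase, hj⟩, if_pos hj]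
        · rw [if_neg (by tauto), if_neg (by tauto), if_neg (by tauto), if_neg hj]
      rw [hrw, map_range_split m (m/2) _ _ (hrl2 i hi) (hrl1 i hi) (Nat.div_le_self _ _)]
  simp only [setCell_eq_modify] at hgrid ⊢
  rw [hgrid]
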